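-- pv_equiv track=rewrite | github.com/cnp777/CS303E-Elements-of-Comptrs-Programmng-Wb | Exam2B.py | stringErrorCorrection
-- ===== SOURCE A (Python) =====
-- def stringErrorCorrection(string, dictionary):
--     newstring = ""
--     for i in range(len(string)):
--         if i in dictionary:
--             newstring += dictionary[i]
--         else:
--             newstring += string[i]
--
--     return newstring
-- ===== SOURCE B (Python) =====
-- def stringErrorCorrection(string, dictionary):
--     # Write the overrides into a mutable buffer instead of scanning each
--     # position and testing membership.
--     result = list(string)
--     for idx, val in dictionary.items():
--         if isinstance(idx, int) and 0 <= idx < len(result):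
--             result[idx] = val
--     return ''.join(result)
-- ===== Notes on version B (the rewrite author's own statement) =====
-- stated objective: alternative
-- what changed: Instead of scanning every string position and testing dict membership, B copies the string into a list buffer once and writes each in-range dictionary override directly at its index, joining at the end; same asymptotic cost, different traversal.
import Mathlib
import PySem

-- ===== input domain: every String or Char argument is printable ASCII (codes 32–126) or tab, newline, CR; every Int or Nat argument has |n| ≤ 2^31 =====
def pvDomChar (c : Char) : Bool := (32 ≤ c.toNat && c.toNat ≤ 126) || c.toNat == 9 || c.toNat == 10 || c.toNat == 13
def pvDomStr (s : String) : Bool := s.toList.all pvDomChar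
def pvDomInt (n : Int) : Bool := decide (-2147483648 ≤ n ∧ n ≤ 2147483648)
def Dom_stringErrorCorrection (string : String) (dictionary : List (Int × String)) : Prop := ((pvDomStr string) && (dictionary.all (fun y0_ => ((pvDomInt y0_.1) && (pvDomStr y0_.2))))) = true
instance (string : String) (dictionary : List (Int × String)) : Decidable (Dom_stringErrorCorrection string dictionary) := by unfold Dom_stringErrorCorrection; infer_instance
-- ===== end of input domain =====

-- B replaces A's per-position membership scan by one pass over the overrides
-- written into a list buffer (objective: alternative decomposition; proved equal
-- in return value on association lists with distinct keys).

-- ===== PORT A =====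
-- for i in range(len(string)): newstring += dictionary[i] if i in dictionary else string[i]
def stringErrorCorrection (string : String) (dictionary : List (Int × String)) : String :=
  String.mk
    ((List.range string.toList.length).foldl (fun acc (i : Nat) =>
      match (PySem.Dict.mk dictionary).get? (i : Int) with
      | some v => acc ++ v.toList
      | none => acc ++ [string.toList.getD i ' ']) [])

-- ===== PORT B =====
-- result = list(string); for idx,val in dictionary.items(): if 0 <= idx < len(result): result[idx] = val; return ''.join(result)
def stringErrorCorrection_alt (string : String) (dictionary : List (Int × String)) : String :=
  let start := string.toList.map (fun c => [c])
  let result := dictionary.foldl (fun res p =>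
    if 0 ≤ p.1 ∧ p.1 < (res.length : Int) then res.set p.1.toNat p.2.toList else res) start
  String.mk result.flatten

-- ===== PRECONDITION & SPEC =====
-- Pre_ excludes association lists with duplicate keys: a Python dict can never
-- contain them, so they do not correspond to any input A runs on; on such lists
-- A's port takes the first binding while B's buffer keeps the last write.
def Pre_stringErrorCorrection (string : String) (dictionary : List (Int × String)) : Prop :=
  (dictionary.map Prod.fst).Nodup
instance (string : String) (dictionary : List (Int × String)) : Decidable (Pre_stringErrorCorrection string dictionary) := by unfold Pre_stringErrorCorrection; infer_instance

def pvWitness_stringErrorCorrection : String × (List (Int × String)) := ("hello", [((0 : Int), "H"), ((4 : Int), "O!")])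

def Spec_stringErrorCorrection (string : String) (dictionary : List (Int × String)) (out : String) : Prop := out = stringErrorCorrection_alt string dictionary
instance (string : String) (dictionary : List (Int × String)) (out : String) : Decidable (Spec_stringErrorCorrection string dictionary out) := by unfold Spec_stringErrorCorrection; infer_instance

-- ===== CLAIM (what is proved, stated in full; the proofs are below) =====
def Claim_equal_stringErrorCorrection : Prop := ∀ (string : String) (dictionary : List (Int × String)), Dom_stringErrorCorrection string dictionary → Pre_stringErrorCorrection string dictionary → Spec_stringErrorCorrection string dictionary (stringErrorCorrection string dictionary)

-- ===== LEMMAS AND PROOFS =====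

-- the per-position value both programs produce at position i
def pvCell (string : String) (dictionary : List (Int × String)) (i : Nat) : List Char :=
  match (PySem.Dict.mk dictionary).get? (i : Int) with
  | some v => v.toList
  | none => [string.toList.getD i ' ']

theorem pv_length_foldB (d : List (Int × String)) (b : List (List Char)) :
    (d.foldl (fun res p =>
      if 0 ≤ p.1 ∧ p.1 < (res.length : Int) then res.set p.1.toNat p.2.toList else res) b).length
      = b.length := by
  induction d generalizing b with
  | nil => rfl
  | cons hd tl ih =>
      simp only [List.foldl_cons]
      split_ifs with h
      · rw [ih]; simp
      · exact ih b

theorem pv_foldB_get (d : List (Int × String)) (hnd : (d.map Prod.fst).Nodup)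
    (b : List (List Char)) (i : Nat) (hi : i < b.length) :
    (d.foldl (fun res p =>
      if 0 ≤ p.1 ∧ p.1 < (res.length : Int) then res.set p.1.toNat p.2.toList else res) b).getD i []
      = match (PySem.Dict.mk d).get? (i : Int) with
        | some v => v.toList
        | none => b.getD i [] := by
  induction d generalizing b with
  | nil =>
      simp [PySem.Dict.get?, PySem.Dict.mk]
  | cons hd tl ih =>
      obtain ⟨k, v⟩ := hd
      simp only [List.map_cons, List.nodup_cons] at hnd
      obtain ⟨hk, htl⟩ := hnd
      rw [List.foldl_cons, PySem.Dict.get?_mk_cons]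
      by_cases hki : k = (i : Int)
      · -- the override at i: in range since i < b.length, written then untouched
        subst hki
        have hrange : (0 : Int) ≤ (i : Int) ∧ (i : Int) < (b.length : Int) := by
          constructor <;> omega
        simp only [hrange, and_self, if_pos, Int.toNat_natCast, beq_self_eq_true, if_true]
        rw [ih htl _ (by simp [hi])]
        have hnone : (PySem.Dict.mk tl).get? (i : Int) = none := by
          rw [PySem.Dict.get?_eq_none_iff_not_mem_keys]
          simpa using hk
        rw [hnone]
        simp [List.getD, hi]
      · -- a different key: the write (if any) does not touch position i
        have hbeq : (k == (i : Int)) = false := by simp [hki]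
        rw [hbeq]
        simp only [Bool.false_eq_true, if_false]
        split_ifs with h
        · rw [ih htl _ (by simp [hi])]
          have : ((b.set k.toNat v.toList).getD i []) = b.getD i [] := by
            have hne : k.toNat ≠ i := by omega
            simp [List.getD, List.getElem?_set_ne hne]
          rw [this]
        · exact ih htl b hi

theorem pv_foldB_eq_map (string : String) (dictionary : List (Int × String))
    (hnd : (dictionary.map Prod.fst).Nodup) :
    dictionary.foldl (fun res p =>
      if 0 ≤ p.1 ∧ p.1 < (res.length : Int) then res.set p.1.toNat p.2.toList else res)
      (string.toList.map (fun c => [c]))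
      = (List.range string.toList.length).map (pvCell string dictionary) := by
  apply List.ext_getElem
  · rw [pv_length_foldB]; simp
  · intro i h1 h2
    have hi : i < string.toList.length := by simpa using h2
    have hb : i < (string.toList.map (fun c => [c])).length := by simpa using hi
    have := pv_foldB_get dictionary hnd (string.toList.map (fun c => [c])) i hb
    have hgetD : ∀ (l : List (List Char)) (h : i < l.length), l.getD i [] = l[i] := by
      intro l h; simp [List.getD, List.getElem?_eq_getElem h]
    rw [hgetD _ h1] at this
    rw [this]
    simp only [List.getElem_map, List.getElem_range, pvCell]
    cases hg : (PySem.Dict.mk dictionary).get? (i : Int) with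
    | some v => rfl
    | none => simp [List.getD, List.getElem?_eq_getElem hi]

-- ===== VERDICT (by name: the statement is the Claim_ definition above) =====
theorem stringErrorCorrection_spec : Claim_equal_stringErrorCorrection := by
  intro string dictionary _ hnd
  unfold Spec_stringErrorCorrection stringErrorCorrection stringErrorCorrection_alt
  show _ = String.mk (List.flatten (dictionary.foldl (fun res p =>
    if 0 ≤ p.1 ∧ p.1 < (res.length : Int) then res.set p.1.toNat p.2.toList else res)
    (string.toList.map (fun c => [c]))))
  rw [pv_foldB_eq_map string dictionary hnd]
  have hA : (List.range string.toList.length).foldl (fun acc (i : Nat) =>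
      match (PySem.Dict.mk dictionary).get? (i : Int) with
      | some v => acc ++ v.toList
      | none => acc ++ [string.toList.getD i ' ']) []
      = (List.range string.toList.length).flatMap (pvCell string dictionary) := by
    have := PySem.List.foldl_append_eq_flatMap (pvCell string dictionary)
      (l := List.range string.toList.length) (acc := [])
    simp only [List.nil_append] at this
    rw [← this]
    apply PySem.List.foldl_congr_mem
    intro acc i _
    unfold pvCell
    cases (PySem.Dict.mk dictionary).get? (i : Int) <;> rfl
  rw [hA, List.flatMap_def]
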